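-- pv_equiv track=rewrite | github.com/wahaibisraa/Problem-of-the-day- | Day 9.py | count_equal_case_substrings
-- ===== SOURCE A (Python) =====
-- def count_equal_case_substrings(s):
--     count = 0
--     prefix_diff_count = {0: 1}
--
--     diff_count = 0
--     for char in s:
--         if char.islower():
--             diff_count += 1
--         else:
--             diff_count -= 1
--
--         if diff_count in prefix_diff_count:
--             count += prefix_diff_count[diff_count]
--
--         if diff_count not in prefix_diff_count:
--             prefix_diff_count[diff_count] = 0
--         prefix_diff_count[diff_count] += 1
--
--     return count
-- ===== SOURCE B (Python) =====
-- def count_equal_case_substrings(s):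
--     total = 0
--     for i in range(len(s)):
--         balance = 0
--         for ch in s[i:]:
--             balance += 1 if ch.islower() else -1
--             if balance == 0:
--                 total += 1
--     return total
-- ===== Notes on version B (the rewrite author's own statement) =====
-- stated objective: simpler
-- what changed: Replaces the single-pass prefix-balance hashmap with a plain nested scan: for each start index, accumulate the lower/other balance over the suffix and count every position where it returns to zero.
import Mathlib
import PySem

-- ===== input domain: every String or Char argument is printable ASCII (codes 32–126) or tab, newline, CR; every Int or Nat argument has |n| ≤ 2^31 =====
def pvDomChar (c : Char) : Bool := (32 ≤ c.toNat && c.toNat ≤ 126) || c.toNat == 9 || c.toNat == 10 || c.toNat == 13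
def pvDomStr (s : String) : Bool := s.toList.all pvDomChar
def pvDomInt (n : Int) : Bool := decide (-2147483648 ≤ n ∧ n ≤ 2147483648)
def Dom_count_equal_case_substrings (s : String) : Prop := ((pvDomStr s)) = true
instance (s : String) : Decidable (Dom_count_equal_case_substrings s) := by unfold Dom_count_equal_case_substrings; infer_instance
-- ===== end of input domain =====

-- B replaces A's one-pass prefix-balance hashmap with a plain nested scan over all start
-- indices (objective: simpler); equal return value proved on the whole domain.

-- ===== PORT A =====
-- step of A's loop over the characters: state = (count, prefix_diff_count, diff_count)
def pvStepA (st : Int × PySem.Dict Int Int × Int) (c : Char) : Int × PySem.Dict Int Int × Int :=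
  let diff := st.2.2 + (if PySem.Chars.islower c then 1 else -1)
  let count := if st.2.1.contains diff then st.1 + st.2.1.getD diff 0 else st.1
  let d1 := if st.2.1.contains diff then st.2.1 else st.2.1.insert diff 0
  (count, d1.modify diff 0 (· + 1), diff)

def count_equal_case_substrings (s : String) : Int :=
  (s.toList.foldl pvStepA (0, PySem.Dict.empty.insert 0 1, 0)).1

-- ===== PORT B =====
-- step of B's inner loop over the suffix s[i:]: state = (balance, total)
def pvStepB (p : Int × Int) (ch : Char) : Int × Int :=
  let balance := p.1 + (if PySem.Chars.islower ch then 1 else -1)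
  (balance, if balance = 0 then p.2 + 1 else p.2)

def count_equal_case_substrings_alt (s : String) : Int :=
  (PySem.List.pyRange 0 (PySem.Str.len s) 1).foldl
    (fun total i => ((PySem.Str.slice s (some i) none).toList.foldl pvStepB (0, total)).2) 0

-- ===== PRECONDITION & SPEC =====
def Spec_count_equal_case_substrings (s : String) (out : Int) : Prop := out = count_equal_case_substrings_alt s
instance (s : String) (out : Int) : Decidable (Spec_count_equal_case_substrings s out) := by unfold Spec_count_equal_case_substrings; infer_instance

-- ===== CLAIM (what is proved, stated in full; the proofs are below) =====
def Claim_equal_count_equal_case_substrings : Prop := ∀ (s : String), Dom_count_equal_case_substrings s → Spec_count_equal_case_substrings s (count_equal_case_substrings s)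

-- ===== LEMMAS AND PROOFS =====

-- the +1/-1 value of a character
def pvV (c : Char) : Int := if PySem.Chars.islower c then 1 else -1

-- list of all prefix balances (length n+1, starts with 0)
def pvPrefs : List Char → List Int
  | [] => [0]
  | c :: t => 0 :: (pvPrefs t).map (pvV c + ·)

-- number of (unordered) pairs of equal entries, counted by first element
def pvPairs : List Int → Int
  | [] => 0
  | x :: xs => (xs.count x : Int) + pvPairs xs

def pvSum (t : List Char) : Int := (t.map pvV).sum

-- per-start contributions of B, one per suffix
def pvBR : List Char → Int
  | [] => 0
  | c :: t => (((pvPrefs (c :: t)).tail.count 0 : Nat) : Int) + pvBR t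

lemma pv_count_map_add (l : List Int) (k x : Int) :
    (l.map (k + ·)).count x = l.count (x - k) := by
  induction l with
  | nil => rfl
  | cons a l ih =>
    simp only [List.map_cons, List.count_cons, ih]
    congr 1
    by_cases h : a = x - k
    · simp [h]
    · have h1 : ¬ (k + a = x) := by omega
      simp [h, h1]

lemma pvPairs_map_add (l : List Int) (k : Int) :
    pvPairs (l.map (k + ·)) = pvPairs l := by
  induction l with
  | nil => rfl
  | cons x xs ih =>
    simp only [List.map_cons, pvPairs, ih, pv_count_map_add]
    have : k + x - k = x := by omega
    rw [this]

lemma pvPairs_snoc (xs : List Int) (x : Int) :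
    pvPairs (xs ++ [x]) = (xs.count x : Int) + pvPairs xs := by
  induction xs with
  | nil => simp [pvPairs]
  | cons y ys ih =>
    simp only [List.cons_append, pvPairs, ih, List.count_cons, List.count_append,
      List.count_nil]
    by_cases h : x = y
    · have h1 : (x == y) = true := by simp [h]
      have h2 : (y == x) = true := by simp [h]
      simp only [h1, h2, if_true]
      push_cast; ring
    · have h1 : (x == y) = false := by simp [h]
      have h2 : (y == x) = false := by simp [Ne.symm h]
      simp only [h1, h2, Bool.false_eq_true, if_false]
      push_cast; ring

lemma pvPrefs_head_tail (t : List Char) : pvPrefs t = 0 :: (pvPrefs t).tail := by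
  cases t <;> rfl

lemma pvSum_snoc (t : List Char) (c : Char) : pvSum (t ++ [c]) = pvSum t + pvV c := by
  simp [pvSum]

lemma pvPrefs_snoc (t : List Char) (c : Char) :
    pvPrefs (t ++ [c]) = pvPrefs t ++ [pvSum t + pvV c] := by
  induction t with
  | nil => simp [pvPrefs, pvSum]
  | cons d t ih =>
    show 0 :: (pvPrefs (t ++ [c])).map (pvV d + ·)
      = (0 :: (pvPrefs t).map (pvV d + ·)) ++ [pvSum (d :: t) + pvV c]
    rw [ih, List.map_append]
    simp only [List.map_cons, List.map_nil, List.cons_append]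
    have h : pvV d + (pvSum t + pvV c) = pvSum (d :: t) + pvV c := by
      simp only [pvSum, List.map_cons, List.sum_cons]; ring
    rw [h]

-- invariant of A's fold: diff is the total balance, the dict is the histogram of the
-- prefix balances seen so far, and count is the number of equal pairs among them
lemma pvAfold (t : List Char) :
    (t.foldl pvStepA (0, PySem.Dict.empty.insert 0 1, 0)).2.2 = pvSum t
  ∧ (∀ x : Int, (t.foldl pvStepA (0, PySem.Dict.empty.insert 0 1, 0)).2.1.getD x 0
        = ((pvPrefs t).count x : Int))
  ∧ (∀ x : Int, (t.foldl pvStepA (0, PySem.Dict.empty.insert 0 1, 0)).2.1.contains x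
        = decide (x ∈ pvPrefs t))
  ∧ (t.foldl pvStepA (0, PySem.Dict.empty.insert 0 1, 0)).1 = pvPairs (pvPrefs t) := by
  induction t using List.reverseRecOn with
  | nil =>
    refine ⟨rfl, ?_, ?_, rfl⟩
    · intro x
      simp only [List.foldl_nil]
      rw [PySem.Dict.getD_insert]
      simp only [pvPrefs, List.count_cons, List.count_nil]
      by_cases h : x = 0
      · simp [h]
      · have h0 : ((0 : Int) == x) = false := by simp; omega
        simp [h, h0, PySem.Dict.getD_empty]
    · intro x
      simp only [List.foldl_nil]
      rw [PySem.Dict.contains_insert]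
      simp only [pvPrefs, List.mem_singleton]
      by_cases h : x = 0
      · simp [h]
      · simp [h, PySem.Dict.contains_empty]
  | append_singleton t c ih =>
    obtain ⟨hdiff, hgetD, hcontains, hcount⟩ := ih
    rw [List.foldl_append]
    set st := t.foldl pvStepA (0, PySem.Dict.empty.insert 0 1, 0) with hst
    have hstep : List.foldl pvStepA st [c] = pvStepA st c := rfl
    have hd : st.2.2 + (if PySem.Chars.islower c then 1 else -1) = pvSum t + pvV c := by
      rw [hdiff]; rfl
    have hprefs := pvPrefs_snoc t c
    have hnotmem : st.2.1.contains (pvSum t + pvV c) = false →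
        (pvSum t + pvV c) ∉ pvPrefs t := by
      intro hc hm
      have h1 := hcontains (pvSum t + pvV c)
      rw [hc] at h1
      simp [hm] at h1
    have hins : ∀ x : Int,
        (if st.2.1.contains (pvSum t + pvV c) then st.2.1
          else st.2.1.insert (pvSum t + pvV c) 0).getD x 0 = st.2.1.getD x 0 := by
      intro x
      split_ifs with hc
      · rfl
      · rw [Bool.not_eq_true] at hc
        rw [PySem.Dict.getD_insert]
        split_ifs with hx
        · rw [hx, hgetD]
          simp [List.count_eq_zero.mpr (hnotmem hc)]
        · rfl
    have hgetD' : ∀ x : Int, (pvStepA st c).2.1.getD x 0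
        = ((pvPrefs (t ++ [c])).count x : Int) := by
      intro x
      show ((if st.2.1.contains (st.2.2 + (if PySem.Chars.islower c then 1 else -1)) then st.2.1
          else st.2.1.insert (st.2.2 + (if PySem.Chars.islower c then 1 else -1)) 0).modify
          (st.2.2 + (if PySem.Chars.islower c then 1 else -1)) 0 (· + 1)).getD x 0
        = ((pvPrefs (t ++ [c])).count x : Int)
      rw [hd, PySem.Dict.getD_modify, hins (pvSum t + pvV c), hins x,
        hgetD (pvSum t + pvV c), hgetD x, hprefs, List.count_append]
      split_ifs with hx
      · rw [hx]
        have h1 : List.count (pvSum t + pvV c) [pvSum t + pvV c] = 1 := by simp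
        rw [h1]
        push_cast; ring
      · have h1 : List.count x [pvSum t + pvV c] = 0 := by
          simp [List.count_singleton]
          intro h; exact hx h.symm
        rw [h1]
        push_cast; ring
    have hcontains' : ∀ x : Int,
        (pvStepA st c).2.1.contains x = decide (x ∈ pvPrefs (t ++ [c])) := by
      intro x
      show ((if st.2.1.contains (st.2.2 + (if PySem.Chars.islower c then 1 else -1)) then st.2.1
          else st.2.1.insert (st.2.2 + (if PySem.Chars.islower c then 1 else -1)) 0).modify
          (st.2.2 + (if PySem.Chars.islower c then 1 else -1)) 0 (· + 1)).contains x
        = decide (x ∈ pvPrefs (t ++ [c]))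
      rw [hd, PySem.Dict.contains_modify, hprefs]
      have hinsc : (if st.2.1.contains (pvSum t + pvV c) then st.2.1
          else st.2.1.insert (pvSum t + pvV c) 0).contains x
          = ((x == pvSum t + pvV c) || st.2.1.contains x) := by
        split_ifs with hc
        · by_cases hx : x = pvSum t + pvV c
          · simp [hx, hc]
          · simp [hx]
        · rw [PySem.Dict.contains_insert]
      rw [hinsc, hcontains]
      by_cases hx : x = pvSum t + pvV c <;> simp [hx, List.mem_append]
    refine ⟨?_, hgetD', hcontains', ?_⟩
    · rw [hstep]
      show st.2.2 + (if PySem.Chars.islower c then 1 else -1) = pvSum (t ++ [c])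
      rw [hd, pvSum_snoc]
    · rw [hstep]
      show (if st.2.1.contains (st.2.2 + (if PySem.Chars.islower c then 1 else -1)) then
          st.1 + st.2.1.getD (st.2.2 + (if PySem.Chars.islower c then 1 else -1)) 0 else st.1)
        = pvPairs (pvPrefs (t ++ [c]))
      rw [hd, hprefs, pvPairs_snoc, hcount]
      split_ifs with hc
      · rw [hgetD]; ring
      · rw [Bool.not_eq_true] at hc
        simp [List.count_eq_zero.mpr (hnotmem hc)]

lemma pvA_eq (s : String) : count_equal_case_substrings s = pvPairs (pvPrefs s.toList) :=
  (pvAfold s.toList).2.2.2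

-- B's inner loop starting from balance b0 adds the number of nonempty prefixes of t
-- whose shifted balance hits 0
lemma pvInner (t : List Char) : ∀ (b0 tot : Int),
    (t.foldl pvStepB (b0, tot)).2 = tot + (((pvPrefs t).tail.count (-b0) : Nat) : Int) := by
  induction t with
  | nil => intro b0 tot; simp [pvPrefs]
  | cons c t ih =>
    intro b0 tot
    have hstep : pvStepB (b0, tot) c = (b0 + pvV c, if b0 + pvV c = 0 then tot + 1 else tot) := rfl
    rw [List.foldl_cons, hstep, ih]
    show (if b0 + pvV c = 0 then tot + 1 else tot) + ((pvPrefs t).tail.count (-(b0 + pvV c)) : Int)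
      = tot + (((pvPrefs (c :: t)).tail.count (-b0) : Nat) : Int)
    have h1 : (pvPrefs (c :: t)).tail = (pvPrefs t).map (pvV c + ·) := rfl
    rw [h1, pv_count_map_add]
    rw [pvPrefs_head_tail t, List.count_cons]
    have h2 : -(b0 + pvV c) = -b0 - pvV c := by ring
    rw [h2]
    by_cases h : b0 + pvV c = 0
    · have h3 : ((0 : Int) == -b0 - pvV c) = true := by simp; omega
      simp only [h3, h, if_true, List.tail_cons]
      push_cast; ring
    · have h3 : ((0 : Int) == -b0 - pvV c) = false := by simp; omega
      simp only [h3, h, Bool.false_eq_true, if_false, List.tail_cons]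
      push_cast; ring

lemma pvBfold (cs : List Char) : ∀ (tot : Int),
    (List.range cs.length).foldl
      (fun tot k => (((cs.drop k).foldl pvStepB (0, tot)).2)) tot = tot + pvBR cs := by
  induction cs with
  | nil => intro tot; simp [pvBR]
  | cons c t ih =>
    intro tot
    rw [List.length_cons, List.range_succ_eq_map, List.foldl_cons, List.foldl_map]
    have h0 : ((c :: t).drop 0).foldl pvStepB (0, tot) = (c :: t).foldl pvStepB (0, tot) := rfl
    have hdrop : ∀ k : Nat, (c :: t).drop (Nat.succ k) = t.drop k := fun k => rfl
    simp only [h0, hdrop]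
    rw [ih]
    rw [pvInner (c :: t) 0 tot]
    show tot + (((pvPrefs (c :: t)).tail.count (-0) : Nat) : Int) + pvBR t = tot + pvBR (c :: t)
    have : (-0 : Int) = 0 := by ring
    rw [this]
    show tot + ((pvPrefs (c :: t)).tail.count 0 : Int) + pvBR t
      = tot + (((pvPrefs (c :: t)).tail.count 0 : Int) + pvBR t)
    ring

lemma pvBR_eq_pairs (cs : List Char) : pvBR cs = pvPairs (pvPrefs cs) := by
  induction cs with
  | nil => simp [pvBR, pvPrefs, pvPairs]
  | cons c t ih =>
    show (((pvPrefs (c :: t)).tail.count 0 : Nat) : Int) + pvBR t = pvPairs (pvPrefs (c :: t))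
    have h1 : pvPrefs (c :: t) = 0 :: (pvPrefs t).map (pvV c + ·) := rfl
    rw [ih, h1]
    show (((pvPrefs t).map (pvV c + ·)).count 0 : Int) + pvPairs (pvPrefs t)
      = pvPairs (0 :: (pvPrefs t).map (pvV c + ·))
    rw [show pvPairs (0 :: (pvPrefs t).map (pvV c + ·))
        = (((pvPrefs t).map (pvV c + ·)).count 0 : Int) + pvPairs ((pvPrefs t).map (pvV c + ·))
      from rfl]
    rw [pvPairs_map_add]

lemma pvB_eq (s : String) : count_equal_case_substrings_alt s = pvPairs (pvPrefs s.toList) := by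
  unfold count_equal_case_substrings_alt
  rw [PySem.Str.len_eq, PySem.List.pyRange_one]
  have hslice : ∀ i : Int, (PySem.Str.slice s (some i) none).toList
      = PySem.List.slice s.toList (some i) none := by
    intro i; simp [PySem.Str.slice]
  rw [List.foldl_map]
  have hbody : ∀ (tot : Int) (k : Nat), k ∈ List.range ((s.toList.length : Int) - 0).toNat →
      ((PySem.Str.slice s (some ((0 : Int) + k)) none).toList.foldl pvStepB (0, tot)).2
      = ((s.toList.drop k).foldl pvStepB (0, tot)).2 := by
    intro tot k _
    rw [hslice, show ((0 : Int) + k) = (k : Int) by ring,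
      PySem.List.slice_from s.toList (by positivity)]
    norm_num
  rw [PySem.List.foldl_congr_mem _ _
    (fun tot k => ((s.toList.drop k).foldl pvStepB (0, tot)).2) _
    (fun tot k hk => hbody tot k hk)]
  have hn : ((s.toList.length : Int) - 0).toNat = s.toList.length := by omega
  rw [hn, pvBfold s.toList 0, pvBR_eq_pairs]
  ring

-- ===== VERDICT (by name: the statement is the Claim_ definition above) =====
theorem count_equal_case_substrings_spec : Claim_equal_count_equal_case_substrings := by
  intro s _
  show count_equal_case_substrings s = count_equal_case_substrings_alt s
  rw [pvA_eq, pvB_eq]
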